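-- pv_equiv track=rewrite | github.com/lxchub-inst/ALP | bemol_corriger.py | gamme_bemol
-- ===== SOURCE A (Python) =====
-- GAMME_BASE = ["do", "ré", "mi", "fa", "sol", "la", "si"]
--
-- SAUT = 4
--
-- def gamme_bemol(nb_alt):
--     i = 0
--     note = ""
--     while nb_alt > 0:
--         if (i - SAUT) >= 0:
--             i = i - SAUT
--         else:
--             i = len(GAMME_BASE) + i - SAUT
--
--         note = GAMME_BASE[i]
--         nb_alt = nb_alt - 1
--
--     return note
-- ===== SOURCE B (Python) =====
-- GAMME_BASE = ["do", "ré", "mi", "fa", "sol", "la", "si"]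
--
-- SAUT = 4
--
-- def gamme_bemol(nb_alt):
--     if nb_alt <= 0:
--         return ""
--     return GAMME_BASE[(3 * nb_alt) % 7]
-- ===== Notes on version B (the rewrite author's own statement) =====
-- stated objective: faster
-- what changed: Replaces the O(nb_alt) descending-fourth stepping loop by a closed-form modular index into GAMME_BASE (scale length modulus), with '' for non-positive nb_alt.
import Mathlib
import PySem

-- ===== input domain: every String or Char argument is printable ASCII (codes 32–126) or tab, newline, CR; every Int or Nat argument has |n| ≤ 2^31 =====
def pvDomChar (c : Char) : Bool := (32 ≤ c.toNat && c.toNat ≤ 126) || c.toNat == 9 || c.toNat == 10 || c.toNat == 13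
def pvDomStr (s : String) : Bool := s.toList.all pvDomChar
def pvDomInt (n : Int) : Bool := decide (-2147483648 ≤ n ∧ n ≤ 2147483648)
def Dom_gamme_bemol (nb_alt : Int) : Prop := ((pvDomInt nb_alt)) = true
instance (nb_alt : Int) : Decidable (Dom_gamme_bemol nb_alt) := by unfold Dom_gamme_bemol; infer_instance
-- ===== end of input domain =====

-- B replaces A's O(nb_alt) stepping loop by an O(1) closed-form modular index into GAMME_BASE (objective: faster).

-- ===== PORT A =====
def gammeBase : List String := ["do", "ré", "mi", "fa", "sol", "la", "si"]

def gammeLoop (nb_alt i : Int) (note : String) : String :=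
  if nb_alt > 0 then
    let i' := if i - 4 ≥ 0 then i - 4 else 7 + i - 4
    gammeLoop (nb_alt - 1) i' ((PySem.List.pyGet? gammeBase i').getD "")
  else note
termination_by nb_alt.toNat
decreasing_by omega

def gamme_bemol (nb_alt : Int) : String := gammeLoop nb_alt 0 ""

-- ===== PORT B =====
def gamme_bemol_alt (nb_alt : Int) : String :=
  if nb_alt ≤ 0 then ""
  else (PySem.List.pyGet? gammeBase (PySem.Int.mod (3 * nb_alt) 7)).getD ""

-- ===== PRECONDITION & SPEC =====
def Spec_gamme_bemol (nb_alt : Int) (out : String) : Prop := out = gamme_bemol_alt nb_alt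
instance (nb_alt : Int) (out : String) : Decidable (Spec_gamme_bemol nb_alt out) := by unfold Spec_gamme_bemol; infer_instance

-- ===== CLAIM (what is proved, stated in full; the proofs are below) =====
def Claim_equal_gamme_bemol : Prop := ∀ (nb_alt : Int), Dom_gamme_bemol nb_alt → Spec_gamme_bemol nb_alt (gamme_bemol nb_alt)

-- ===== LEMMAS AND PROOFS =====

lemma gammeLoop_closed (n : Nat) : ∀ (i : Int) (note : String), 0 ≤ i → i < 7 →
    gammeLoop (n : Int) i note =
      if n = 0 then note else (PySem.List.pyGet? gammeBase ((i + 3 * (n : Int)) % 7)).getD "" := by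
  induction n with
  | zero => intro i note h0 h7; rw [gammeLoop]; simp
  | succ k ih =>
    intro i note h0 h7
    rw [gammeLoop]
    have hpos : ((k + 1 : Nat) : Int) > 0 := by positivity
    simp only [hpos, if_true]
    set i' : Int := if i - 4 ≥ 0 then i - 4 else 7 + i - 4 with hi'
    have hi0 : 0 ≤ i' := by rw [hi']; split_ifs <;> omega
    have hi7 : i' < 7 := by rw [hi']; split_ifs <;> omega
    have hc : ((k + 1 : Nat) : Int) - 1 = (k : Int) := by push_cast; ring
    rw [hc, ih i' _ hi0 hi7]
    by_cases hk : k = 0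
    · subst hk
      simp only [if_true]
      congr 1
      have : (i + 3 * ((1 : Nat) : Int)) % 7 = i' := by rw [hi']; split_ifs <;> omega
      rw [this]
    · simp only [hk, if_false]
      congr 2
      have : i' % 7 = (i + 3) % 7 := by rw [hi']; split_ifs <;> omega
      push_cast
      push_cast at this
      omega

-- ===== VERDICT (by name: the statement is the Claim_ definition above) =====
theorem gamme_bemol_spec : Claim_equal_gamme_bemol := by
  intro n _
  unfold Spec_gamme_bemol gamme_bemol gamme_bemol_alt
  by_cases h : n ≤ 0
  · rw [gammeLoop]; simp [h, show ¬ n > 0 by omega]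
  · have h0 : 0 < n := by omega
    have hn : ((n.toNat : Nat) : Int) = n := by omega
    rw [← hn, gammeLoop_closed n.toNat 0 "" (by omega) (by omega)]
    have hne : n.toNat ≠ 0 := by omega
    simp only [hne, if_false, hn]
    rw [if_neg h]
    congr 1
    rw [PySem.Int.mod_eq_emod_of_pos (by norm_num)]
    have he : (0 + 3 * n) % 7 = 3 * n % 7 := by ring_nf
    rw [he]
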